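-- pv_equiv track=rewrite | github.com/reuben-dutton/recipe-processor | bin/annotations_to_crfpp.py | addPrefixes
-- ===== SOURCE A (Python) =====
-- def addPrefixes(annotations):
--     prevTag = None
--     newAnnotations = []
--     for token, tag in annotations:
--         p = "B" if ((prevTag is None) or (tag != prevTag)) else "I"
--         newAnnotations.append((token, "%s-%s" % (p, tag)))
--         prevTag = tag
--     return newAnnotations
-- ===== SOURCE B (Python) =====
-- def addPrefixes(annotations):
--     # Run-based decomposition: peel off the maximal leading run of equal tags,
--     # emit B- for its head and I- for the rest, recurse on what remains.
--     if not annotations: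
--         return []
--     token, tag = annotations[0]
--     run_len = 1
--     while run_len < len(annotations) and annotations[run_len][1] == tag:
--         run_len += 1
--     head = [(token, "B-" + tag)]
--     for tok, t in annotations[1:run_len]:
--         head.append((tok, "I-" + t))
--     return head + addPrefixes(annotations[run_len:])
-- ===== Notes on version B (the rewrite author's own statement) =====
-- stated objective: alternative
-- what changed: B replaces A's flat scan carrying a prevTag variable by a run-based decomposition: it peels off each maximal run of consecutive equal tags, emits B- for the run head and I- for the rest, and recurses on the remainder.
import Mathlib
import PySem

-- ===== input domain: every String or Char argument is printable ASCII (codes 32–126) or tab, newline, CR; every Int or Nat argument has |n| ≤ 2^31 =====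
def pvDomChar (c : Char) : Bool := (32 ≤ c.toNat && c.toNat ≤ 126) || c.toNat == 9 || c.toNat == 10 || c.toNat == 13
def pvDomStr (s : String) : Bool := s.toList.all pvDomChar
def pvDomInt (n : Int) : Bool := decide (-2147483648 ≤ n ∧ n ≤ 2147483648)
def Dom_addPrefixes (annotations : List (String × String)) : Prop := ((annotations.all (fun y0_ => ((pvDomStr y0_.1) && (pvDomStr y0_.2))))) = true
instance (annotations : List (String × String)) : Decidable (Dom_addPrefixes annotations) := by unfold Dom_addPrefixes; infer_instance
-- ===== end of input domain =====

-- B replaces A's flat prevTag scan by a run-based recursion (maximal runs of equal tags); equivalence of return values.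
-- ===== PORT A =====
def addPrefixes (annotations : List (String × String)) : List (String × String) :=
  (annotations.foldl
    (fun (st : Option String × List (String × String)) item =>
      let prevTag := st.1
      let p := if prevTag = none ∨ some item.2 ≠ prevTag then "B" else "I"
      (some item.2, st.2 ++ [(item.1, p ++ "-" ++ item.2)]))
    (none, [])).2

-- ===== PORT B =====
def addPrefixes_alt : List (String × String) → List (String × String)
  | [] => []
  | (token, tag) :: rest =>
    -- run = the tokens after the head that continue the same tag (B's while loop / slice)
    let run := rest.takeWhile (fun p => p.2 == tag)
    (token, "B-" ++ tag) :: (run.map (fun p => (p.1, "I-" ++ p.2))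
      ++ addPrefixes_alt (rest.dropWhile (fun p => p.2 == tag)))
termination_by l => l.length
decreasing_by
  simp only [List.length_cons]
  exact Nat.lt_succ_of_le (List.length_dropWhile_le _ _)
-- ===== PRECONDITION & SPEC =====
def Spec_addPrefixes (annotations : List (String × String)) (out : List (String × String)) : Prop := out = addPrefixes_alt annotations
instance (annotations : List (String × String)) (out : List (String × String)) : Decidable (Spec_addPrefixes annotations out) := by unfold Spec_addPrefixes; infer_instance

-- ===== CLAIM (what is proved, stated in full; the proofs are below) =====
def Claim_equal_addPrefixes : Prop := ∀ (annotations : List (String × String)), Dom_addPrefixes annotations → Spec_addPrefixes annotations (addPrefixes annotations)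

-- ===== LEMMAS AND PROOFS =====
-- A's loop, written as structural recursion on the remaining list with the prevTag state.
def goA (prev : Option String) : List (String × String) → List (String × String)
  | [] => []
  | (token, tag) :: rest =>
    (token, (if prev = none ∨ some tag ≠ prev then "B" else "I") ++ "-" ++ tag) :: goA (some tag) rest

theorem foldA_eq (l : List (String × String)) : ∀ (prev : Option String) (acc : List (String × String)),
    (l.foldl
      (fun (st : Option String × List (String × String)) item =>
        let prevTag := st.1
        let p := if prevTag = none ∨ some item.2 ≠ prevTag then "B" else "I"
        (some item.2, st.2 ++ [(item.1, p ++ "-" ++ item.2)]))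
      (prev, acc)).2 = acc ++ goA prev l := by
  induction l with
  | nil => intro prev acc; simp [goA]
  | cons h t ih =>
    intro prev acc
    obtain ⟨token, tag⟩ := h
    simp only [List.foldl_cons, goA, ih]
    simp

theorem goA_some (tag : String) (l : List (String × String)) :
    goA (some tag) l =
      (l.takeWhile (fun p => p.2 == tag)).map (fun p => (p.1, "I-" ++ p.2))
        ++ goA none (l.dropWhile (fun p => p.2 == tag)) := by
  induction l with
  | nil => simp [goA]
  | cons h t ih =>
    obtain ⟨token, t2⟩ := h
    by_cases heq : t2 = tag
    · subst heq
      simp [goA, List.takeWhile, List.dropWhile, ih]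
    · have hb : (t2 == tag) = false := beq_eq_false_iff_ne.mpr heq
      simp [goA, List.takeWhile, List.dropWhile, hb, heq]

theorem goA_none_eq_alt (l : List (String × String)) : goA none l = addPrefixes_alt l := by
  induction l using addPrefixes_alt.induct with
  | case1 => simp [goA, addPrefixes_alt]
  | case2 token tag rest ih =>
    rw [addPrefixes_alt]
    simp only [goA, goA_some, ih]
    simp

-- ===== VERDICT (by name: the statement is the Claim_ definition above) =====
theorem addPrefixes_spec : Claim_equal_addPrefixes := by
  intro annotations _
  unfold Spec_addPrefixes addPrefixes
  rw [foldA_eq annotations none [], goA_none_eq_alt]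
  simp
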